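-- pv_equiv track=rewrite | github.com/MAMi1903x/Bakim-Paketi-Olusturma | deneme1.py | table_looks_like_summary
-- ===== SOURCE A (Python) =====
-- def normalize_colname(c) -> str:
--     return str(c).strip().upper() if c is not None else ""
--
-- def table_looks_like_summary(header_row) -> bool:
--     header = [normalize_colname(h) for h in header_row]
--     has_desc = any("DESC" in h for h in header)
--     has_mh = any("MH" in h for h in header)
--     has_ref = (
--         any("REFER" in h for h in header)
--         or any("W/O" in h for h in header)
--         or any("WO" in h.replace(" ", "") for h in header)
--     )
--     return has_desc and has_mh and has_ref
-- ===== SOURCE B (Python) =====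
-- def table_looks_like_summary(header_row) -> bool:
--     # Fuse the normalized cells into ONE string with a '|' separator (no marker
--     # contains '|', so matches never cross cell boundaries) and run the substring
--     # tests on that single string instead of scanning cell by cell.
--     joined = "|".join(
--         str(h).strip().upper() if h is not None else "" for h in header_row
--     )
--     return (
--         "DESC" in joined
--         and "MH" in joined
--         and ("REFER" in joined or "W/O" in joined or "WO" in joined.replace(" ", ""))
--     )
-- ===== Notes on version B (the rewrite author's own statement) =====
-- stated objective: alternative
-- what changed: B joins the normalized cells into one '|'-separated string and runs each substring test once on that single string (correct because no marker contains '|', so matches cannot cross cell boundaries), instead of A's per-cell any() scans; C-level find on one big string beats per-cell Python-loop scans.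
import Mathlib
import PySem

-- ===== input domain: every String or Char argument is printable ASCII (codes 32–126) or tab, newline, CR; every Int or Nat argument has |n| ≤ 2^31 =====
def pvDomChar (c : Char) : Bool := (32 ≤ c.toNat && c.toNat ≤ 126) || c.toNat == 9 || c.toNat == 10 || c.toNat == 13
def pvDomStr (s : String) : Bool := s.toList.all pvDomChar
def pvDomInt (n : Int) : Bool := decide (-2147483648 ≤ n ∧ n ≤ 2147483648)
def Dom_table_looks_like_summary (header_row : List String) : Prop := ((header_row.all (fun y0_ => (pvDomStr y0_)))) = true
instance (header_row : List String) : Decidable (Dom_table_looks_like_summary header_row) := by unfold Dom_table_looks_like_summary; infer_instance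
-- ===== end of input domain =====

-- B fuses the normalized cells into one '|'-separated string and runs each substring test once on it (no marker contains '|', so matches cannot cross cells); alternative organization, same result.

-- ===== PORT A =====
def normalize_colname (c : String) : String := PySem.Str.upper (PySem.Str.strip c)

def table_looks_like_summary (header_row : List String) : Bool :=
  let header := header_row.map normalize_colname
  let has_desc := header.any (fun h => PySem.Str.isIn "DESC" h)
  let has_mh := header.any (fun h => PySem.Str.isIn "MH" h)
  let has_ref :=
    header.any (fun h => PySem.Str.isIn "REFER" h)
    || header.any (fun h => PySem.Str.isIn "W/O" h)
    || header.any (fun h => PySem.Str.isIn "WO" (PySem.Str.replace h " " ""))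
  has_desc && has_mh && has_ref

-- ===== PORT B =====
def table_looks_like_summary_alt (header_row : List String) : Bool :=
  let joined := PySem.Str.join "|"
    (header_row.map (fun h => PySem.Str.upper (PySem.Str.strip h)))
  PySem.Str.isIn "DESC" joined
  && PySem.Str.isIn "MH" joined
  && (PySem.Str.isIn "REFER" joined
      || PySem.Str.isIn "W/O" joined
      || PySem.Str.isIn "WO" (PySem.Str.replace joined " " ""))

-- ===== PRECONDITION & SPEC =====
def Spec_table_looks_like_summary (header_row : List String) (out : Bool) : Prop := out = table_looks_like_summary_alt header_row
instance (header_row : List String) (out : Bool) : Decidable (Spec_table_looks_like_summary header_row out) := by unfold Spec_table_looks_like_summary; infer_instance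

-- ===== CLAIM (what is proved, stated in full; the proofs are below) =====
def Claim_equal_table_looks_like_summary : Prop := ∀ (header_row : List String), Dom_table_looks_like_summary header_row → Spec_table_looks_like_summary header_row (table_looks_like_summary header_row)

-- ===== LEMMAS AND PROOFS =====

-- a pattern avoiding sep is a prefix of u ++ sep :: b iff it is a prefix of u
theorem tls_prefix_sep {p u b : List Char} {sep : Char} (hs : sep ∉ p) :
    p <+: u ++ sep :: b ↔ p <+: u := by
  constructor
  · intro h
    have hp := List.prefix_iff_eq_take.mp h
    by_cases hl : p.length ≤ u.length
    · rw [List.take_append] at hp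
      have : u.take p.length ++ (sep :: b).take (p.length - u.length)
           = u.take p.length := by
        have : p.length - u.length = 0 := by omega
        simp [this]
      rw [this] at hp
      exact hp ▸ List.take_prefix _ _
    · exfalso
      apply hs
      rw [hp, List.take_append]
      refine List.mem_append.mpr (Or.inr ?_)
      obtain ⟨k, hk⟩ : ∃ k, p.length - u.length = k + 1 := ⟨p.length - u.length - 1, by omega⟩
      simp [hk]
  · intro h
    exact h.trans (List.prefix_append u (sep :: b))

-- a pattern avoiding sep occurs in u ++ sep :: b iff it occurs in u or in b
theorem tls_infix_sep {p : List Char} {sep : Char} (hs : sep ∉ p) :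
    ∀ (u b : List Char), p <:+: u ++ sep :: b ↔ p <:+: u ∨ p <:+: b := by
  intro u b
  induction u with
  | nil =>
    simp only [List.nil_append, List.infix_cons_iff]
    rw [show (sep :: b) = ([] : List Char) ++ sep :: b from rfl, tls_prefix_sep hs]
    simp [List.prefix_nil, List.infix_nil]
  | cons x u ih =>
    simp only [List.cons_append, List.infix_cons_iff] at *
    rw [show (x :: (u ++ sep :: b)) = (x :: u) ++ sep :: b from rfl, tls_prefix_sep hs, ih]
    tauto

-- searching the sep-joined parts = searching each part, for a nonempty pattern avoiding sep
theorem tls_isIn_join {p : List Char} {sep : Char} (hp : p ≠ []) (hs : sep ∉ p) :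
    ∀ (parts : List (List Char)),
      PySem.Chars.isIn p (PySem.Chars.join [sep] parts)
        = parts.any (fun q => PySem.Chars.isIn p q) := by
  intro parts
  induction parts with
  | nil =>
    rw [Bool.eq_iff_iff]
    simp [PySem.Chars.isIn_iff_infix, PySem.Chars.join, List.intercalate, hp]
  | cons x rest ih =>
    cases rest with
    | nil => simp [PySem.Chars.join, List.intercalate]
    | cons y r =>
      rw [Bool.eq_iff_iff]
      rw [PySem.Chars.join_cons_cons]
      have : x ++ [sep] ++ PySem.Chars.join [sep] (y :: r)
           = x ++ sep :: PySem.Chars.join [sep] (y :: r) := by simp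
      rw [this, PySem.Chars.isIn_iff_infix, tls_infix_sep hs]
      rw [Bool.eq_iff_iff] at ih
      simp only [List.any_cons, Bool.or_eq_true, PySem.Chars.isIn_iff_infix] at *
      tauto

-- helper for replace_space: the fueled scanner with old = [' '], new = [] is a filter
theorem tls_go_filter : ∀ (fuel : Nat) (l acc : List Char), l.length ≤ fuel →
    PySem.Chars.replace.go [' '] [] fuel l acc
      = acc.reverse ++ l.filter (fun c => !(c == ' ')) := by
  intro fuel
  induction fuel with
  | zero =>
    intro l acc hl
    have : l = [] := List.eq_nil_of_length_eq_zero (Nat.le_zero.mp hl)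
    subst this
    simp [PySem.Chars.replace.go]
  | succ n ih =>
    intro l acc hl
    cases l with
    | nil => simp [PySem.Chars.replace.go]
    | cons c t =>
      rw [PySem.Chars.replace.go]
      by_cases hc : c = ' '
      · subst hc
        have hpre : List.isPrefixOf [' '] (' ' :: t) = true := by
          simp [List.isPrefixOf]
        simp only [hpre, if_true, List.reverse_nil, List.nil_append]
        rw [ih _ _ (by simpa using Nat.le_of_succ_le_succ hl)]
        simp
      · have hpre : List.isPrefixOf [' '] (c :: t) = false := by
          simp [List.isPrefixOf]
          intro h; exact absurd h.symm hc
        simp only [hpre, Bool.false_eq_true, if_false]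
        rw [ih _ _ (by simpa using Nat.le_of_succ_le_succ hl)]
        simp [hc]

theorem tls_replace_space (cs : List Char) :
    PySem.Chars.replace cs [' '] [] = cs.filter (fun c => !(c == ' ')) := by
  rw [PySem.Chars.replace]
  simp only [List.isEmpty_cons]
  exact tls_go_filter cs.length cs [] le_rfl

-- removing spaces commutes with joining on '|' (the separator is not a space)
theorem tls_filter_join (parts : List (List Char)) :
    (PySem.Chars.join ['|'] parts).filter (fun c => !(c == ' '))
      = PySem.Chars.join ['|'] (parts.map (fun q => q.filter (fun c => !(c == ' ')))) := by
  induction parts with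
  | nil => simp [PySem.Chars.join, List.intercalate]
  | cons x rest ih =>
    cases rest with
    | nil => simp [PySem.Chars.join, List.intercalate]
    | cons y r =>
      rw [PySem.Chars.join_cons_cons, List.map_cons, List.map_cons,
          PySem.Chars.join_cons_cons]
      rw [List.filter_append, List.filter_append, ih]
      simp

-- ===== VERDICT (by name: the statement is the Claim_ definition above) =====
theorem table_looks_like_summary_spec : Claim_equal_table_looks_like_summary := by
  intro header_row _
  unfold Spec_table_looks_like_summary table_looks_like_summary table_looks_like_summary_alt normalize_colname
  simp only [PySem.Str.isIn_eq, PySem.Str.toList_join, PySem.Str.toList_replace,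
    PySem.Str.toList_upper, PySem.Str.toList_strip, List.map_map, Function.comp_def]
  simp only [show (" " : String).toList = [' '] from rfl,
    show ("" : String).toList = ([] : List Char) from rfl, tls_replace_space]
  rw [show ("|" : String).toList = ['|'] from rfl, tls_filter_join]
  rw [tls_isIn_join (by decide) (by decide),
      tls_isIn_join (by decide) (by decide),
      tls_isIn_join (by decide) (by decide),
      tls_isIn_join (by decide) (by decide),
      tls_isIn_join (by decide) (by decide)]
  simp only [List.any_map, Function.comp_def, PySem.Str.toList_upper, PySem.Str.toList_strip]
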